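-- pv_equiv track=rewrite | github.com/Michael52555/Research | Abelian_p_groups_test.py | endomorphism_matrices
-- ===== SOURCE A (Python) =====
-- from itertools import product, combinations
--
-- def mods_from_exponents(p, exps):
--     return [p**a for a in exps]
--
-- def endomorphism_matrices(p, exps):
--     n = len(exps)
--     mods = mods_from_exponents(p, exps)
--     allowed = []
--     for i in range(n):
--         row = []
--         for j in range(n):
--             min_pow = max(0, exps[i] - exps[j])
--             step = p**min_pow
--             row.append(list(range(0, mods[i], step)))
--         allowed.append(row)
--
--     for rows in product(*[product(*allowed[i]) for i in range(n)]):
--         yield rows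
-- ===== SOURCE B (Python) =====
-- def _range_len(m, s):
--     # number of elements of range(0, m, s)
--     if s > 0:
--         return max(0, (m + s - 1) // s)
--     return max(0, (m + s + 1) // s)
--
-- def endomorphism_matrices(p, exps):
--     # Mixed-radix enumeration: instead of nested Cartesian products, compute the
--     # step and choice count of each of the n*n cells, multiply the counts into a
--     # total, and decode every index 0..total-1 into a matrix by repeated divmod
--     # (last cell least significant), reshaping the flat entry list into rows.
--     n = len(exps)
--     steps = [p ** max(0, exps[i] - exps[j]) for i in range(n) for j in range(n)]
--     counts = [_range_len(p ** exps[i], p ** max(0, exps[i] - exps[j]))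
--               for i in range(n) for j in range(n)]
--     total = 1
--     for c in counts:
--         total *= c
--     rev = list(zip(counts, steps))[::-1]
--     for idx in range(total):
--         r = idx
--         entries = []
--         for c, s in rev:
--             r, d = divmod(r, c)
--             entries = [d * s] + entries
--         yield tuple(tuple(entries[i * n:(i + 1) * n]) for i in range(n))
-- ===== Notes on version B (the rewrite author's own statement) =====
-- stated objective: alternative
-- what changed: B replaces the nested itertools.product enumeration by mixed-radix index decoding: it computes the step and choice count of each of the n*n cells, multiplies the counts into a total, and decodes every index 0..total-1 into a matrix by repeated divmod (last cell least significant), which yields the matrices in the same order.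
import Mathlib
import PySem

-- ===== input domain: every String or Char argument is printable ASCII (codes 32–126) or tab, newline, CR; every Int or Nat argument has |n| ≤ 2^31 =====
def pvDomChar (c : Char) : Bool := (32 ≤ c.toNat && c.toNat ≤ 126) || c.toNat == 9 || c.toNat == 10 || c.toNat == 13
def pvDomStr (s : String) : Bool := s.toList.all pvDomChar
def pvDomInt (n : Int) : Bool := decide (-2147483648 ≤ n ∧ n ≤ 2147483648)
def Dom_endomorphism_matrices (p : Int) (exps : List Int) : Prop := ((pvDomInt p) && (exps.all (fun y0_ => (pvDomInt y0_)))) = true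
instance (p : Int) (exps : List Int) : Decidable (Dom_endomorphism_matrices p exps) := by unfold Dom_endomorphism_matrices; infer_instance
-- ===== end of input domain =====

-- B replaces the nested itertools.product enumeration by mixed-radix index decoding:
-- per-cell step and choice count, one total, and divmod-decoding of each index 0..total-1
-- (objective: alternative — same cost, genuinely different enumeration mechanism).
-- Both A and B are Python generators; the ports return the list of yielded values.

-- ===== PORT A =====
-- itertools.product over a list of iterables (last component varies fastest)
def pyProduct {α : Type} (ls : List (List α)) : List (List α) :=
  ls.foldr (fun l acc => l.flatMap (fun x => acc.map (fun t => x :: t))) [[]]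

-- p**a, exact for a ≥ 0 (Pre_ excludes negative exponents, where Python produces a float)
def mods_from_exponents (p : Int) (exps : List Int) : List Int :=
  exps.map (fun a => p ^ a.toNat)

def endomorphism_matrices (p : Int) (exps : List Int) : List (List (List Int)) :=
  -- totality guard: on a negative exponent Python's p**a is a float and range(...) raises
  -- TypeError before anything is yielded (outside Pre_); the port returns [] there
  if exps.any (fun a => decide (a < 0)) then [] else
  let n := exps.length
  let mods := mods_from_exponents p exps
  let allowed : List (List (List Int)) :=
    (List.range n).map (fun i =>
      (List.range n).map (fun j =>
        let min_pow := max 0 (exps.getD i 0 - exps.getD j 0)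
        let step := p ^ min_pow.toNat
        PySem.List.pyRange 0 (mods.getD i 0) step))
  pyProduct (allowed.map (fun row => pyProduct row))

-- ===== PORT B =====
-- _range_len(m, s) = len(range(0, m, s))
def pvCount (m s : Int) : Int :=
  if 0 < s then max 0 (PySem.Int.floordiv (m + s - 1) s)
  else max 0 (PySem.Int.floordiv (m + s + 1) s)

def endomorphism_matrices_alt (p : Int) (exps : List Int) : List (List (List Int)) :=
  let n := exps.length
  let steps := (List.range n).flatMap (fun i =>
      (List.range n).map (fun j => p ^ (max 0 (exps.getD i 0 - exps.getD j 0)).toNat))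
  let counts := (List.range n).flatMap (fun i =>
      (List.range n).map (fun j =>
        pvCount (p ^ (exps.getD i 0).toNat) (p ^ (max 0 (exps.getD i 0 - exps.getD j 0)).toNat)))
  let total := counts.foldl (· * ·) 1
  let rev := (counts.zip steps).reverse
  (PySem.List.pyRange 0 total 1).map (fun idx =>
    let entries := (rev.foldl
        (fun (st : Int × List Int) cs =>
          (PySem.Int.floordiv st.1 cs.1, PySem.Int.mod st.1 cs.1 * cs.2 :: st.2))
        (idx, ([] : List Int))).2
    (List.range n).map (fun (i : Nat) =>
      PySem.List.slice entries (some ((i : Int) * (n : Int))) (some (((i : Int) + 1) * (n : Int)))))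

-- ===== PRECONDITION & SPEC =====
-- Pre_ excludes only inputs on which A raises: a negative exponent makes p**a a float and
-- range(...) a TypeError, and p = 0 with non-equal exponents gives range step 0 (ValueError).
def Pre_endomorphism_matrices (p : Int) (exps : List Int) : Prop :=
  (∀ a ∈ exps, 0 ≤ a) ∧ (p ≠ 0 ∨ ∀ a ∈ exps, ∀ b ∈ exps, a = b)
instance (p : Int) (exps : List Int) : Decidable (Pre_endomorphism_matrices p exps) := by
  unfold Pre_endomorphism_matrices; infer_instance

def pvWitness_endomorphism_matrices : Int × List Int := (2, [1, 2])

def Spec_endomorphism_matrices (p : Int) (exps : List Int) (out : List (List (List Int))) : Prop := out = endomorphism_matrices_alt p exps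
instance (p : Int) (exps : List Int) (out : List (List (List Int))) : Decidable (Spec_endomorphism_matrices p exps out) := by unfold Spec_endomorphism_matrices; infer_instance

-- ===== CLAIM (what is proved, stated in full; the proofs are below) =====
def Claim_equal_endomorphism_matrices : Prop := ∀ (p : Int) (exps : List Int), Dom_endomorphism_matrices p exps → Pre_endomorphism_matrices p exps → Spec_endomorphism_matrices p exps (endomorphism_matrices p exps)

-- ===== LEMMAS AND PROOFS =====

-- ---- generic list lemmas ----

theorem getD_map_range {α : Type} (f : Nat → α) (n k : Nat) (d : α) (h : k < n) :
    ((List.range n).map f).getD k d = f k := by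
  simp [List.getD_eq_getElem?_getD, List.getElem?_map, List.getElem?_range h]

theorem map_getD_range_self {α : Type} (c : List α) (d : α) :
    (List.range c.length).map (fun q => c.getD q d) = c := by
  apply List.ext_getElem
  · simp
  · intro i h1 h2
    simp [List.getD_eq_getElem?_getD, List.getElem?_eq_getElem h2]

theorem range_mul_flatMap {α : Type} (a b : Nat) (g : Nat → Nat → α) :
    (List.range a).flatMap (fun q => (List.range b).map (g q))
      = (List.range (a * b)).map (fun k => g (k / b) (k % b)) := by
  induction a with
  | zero => simp
  | succ a ih =>
    rw [List.range_succ, List.flatMap_append, ih,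
      show (a + 1) * b = a * b + b by ring, List.range_add, List.map_append]
    congr 1
    rw [List.flatMap_cons, List.flatMap_nil, List.append_nil, List.map_map]
    apply List.map_congr_left
    intro j hj
    rw [List.mem_range] at hj
    have hb : 0 < b := by omega
    have h1 : (a * b + j) / b = a := by
      rw [mul_comm a b, Nat.mul_add_div hb, Nat.div_eq_of_lt hj, Nat.add_zero]
    have h2 : (a * b + j) % b = j := by
      rw [mul_comm a b, Nat.mul_add_mod, Nat.mod_eq_of_lt hj]
    simp [Function.comp, h1, h2]

theorem ediv_nonpos_of_lt {a b : Int} (hb : 0 < b) (h : a < b) : a / b ≤ 0 := by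
  by_contra hq
  have h1 : (1 : Int) ≤ a / b := by omega
  have := (Int.le_ediv_iff_mul_le hb).mp h1
  omega

-- ---- cartesian product as index decoding ----

def prodLen {α : Type} (cs : List (List α)) : Nat := (cs.map List.length).prod

def msDecode {α : Type} (d : α) : List (List α) → Nat → List α
  | [], _ => []
  | c :: cs, idx => c.getD (idx / prodLen cs) d :: msDecode d cs (idx % prodLen cs)

def msDigits : List Nat → Nat → List Nat
  | [], _ => []
  | _ :: cs, r => r / cs.prod :: msDigits cs (r % cs.prod)

theorem pyProduct_eq_decode {α : Type} (d : α) (cs : List (List α)) :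
    pyProduct cs = (List.range (prodLen cs)).map (fun idx => msDecode d cs idx) := by
  induction cs with
  | nil => simp [pyProduct, prodLen, msDecode, List.range_one]
  | cons c cs ih =>
    show c.flatMap (fun x => (pyProduct cs).map (x :: ·)) = _
    conv_lhs => rw [← map_getD_range_self c d]
    rw [List.flatMap_map, ih]
    simp only [List.map_map, Function.comp_def]
    rw [range_mul_flatMap (g := fun q r => c.getD q d :: msDecode d cs r)]
    have hp : prodLen (c :: cs) = c.length * prodLen cs := by simp [prodLen]
    rw [hp]
    apply List.map_congr_left
    intro k _
    rfl

-- cells of the grid: (count, step) ↦ the list [0, s, 2s, …] of count elements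
def cellOf (pr : Nat × Int) : List Int := (List.range pr.1).map (fun k => (Nat.cast k : Int) * pr.2)

theorem prodLen_map_cellOf (cs : List (Nat × Int)) :
    prodLen (cs.map cellOf) = (cs.map (fun pr => pr.1)).prod := by
  simp [prodLen, cellOf, List.map_map, Function.comp_def]

-- ---- the decoded combination, entrywise ----

theorem decode_eq_zip (cs : List (Nat × Int)) (idx : Nat)
    (h : idx < (cs.map (fun pr => pr.1)).prod) :
    msDecode 0 (cs.map cellOf) idx
      = List.zipWith (fun (d : Nat) (pr : Nat × Int) => (Nat.cast d : Int) * pr.2)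
          (msDigits (cs.map (fun pr => pr.1)) idx) cs := by
  induction cs generalizing idx with
  | nil => simp [msDecode, msDigits]
  | cons pr cs ih =>
    have hP : prodLen (cs.map cellOf) = (cs.map (fun pr => pr.1)).prod := prodLen_map_cellOf cs
    simp only [List.map_cons, List.prod_cons] at h
    have hP0 : 0 < (cs.map (fun pr => pr.1)).prod := by
      rcases Nat.eq_zero_or_pos (cs.map (fun pr => pr.1)).prod with h0 | h0
      · rw [h0, Nat.mul_zero] at h; omega
      · exact h0
    have hd : idx / (cs.map (fun pr => pr.1)).prod < pr.1 :=
      (Nat.div_lt_iff_lt_mul hP0).mpr h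
    simp only [List.map_cons, msDecode, msDigits, hP, List.zipWith_cons_cons]
    rw [ih (idx % (cs.map (fun pr => pr.1)).prod) (Nat.mod_lt _ hP0)]
    congr 1
    simp only [cellOf]
    rw [getD_map_range _ _ _ _ hd]

-- ---- the divmod entry loop of port B ----

theorem foldr_entries (ps : List (Nat × Int)) (idx : Nat) :
    (ps.map (fun pr => ((Nat.cast pr.1 : Int), pr.2))).foldr
      (fun cs st => (PySem.Int.floordiv st.1 cs.1, PySem.Int.mod st.1 cs.1 * cs.2 :: st.2))
      ((idx : Int), ([] : List Int))
    = (((idx / (ps.map (fun pr => pr.1)).prod : Nat) : Int),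
       List.zipWith (fun (d : Nat) (pr : Nat × Int) => (Nat.cast d : Int) * pr.2)
         (msDigits (ps.map (fun pr => pr.1)) (idx % (ps.map (fun pr => pr.1)).prod)) ps) := by
  induction ps with
  | nil => simp [msDigits]
  | cons pr ps ih =>
    rw [List.map_cons, List.foldr_cons, ih]
    simp only [PySem.Int.floordiv_natCast, PySem.Int.mod_natCast]
    have h1 : idx / (ps.map (fun pr => pr.1)).prod / pr.1
        = idx / (pr.1 * (ps.map (fun pr => pr.1)).prod) := by
      rw [Nat.div_div_eq_div_mul, mul_comm]
    have h2 : idx % (pr.1 * (ps.map (fun pr => pr.1)).prod) % (ps.map (fun pr => pr.1)).prod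
        = idx % (ps.map (fun pr => pr.1)).prod :=
      Nat.mod_mod_of_dvd idx ⟨pr.1, mul_comm pr.1 _⟩
    have h3 : idx % (pr.1 * (ps.map (fun pr => pr.1)).prod) / (ps.map (fun pr => pr.1)).prod
        = idx / (ps.map (fun pr => pr.1)).prod % pr.1 := by
      rw [mul_comm pr.1 _]
      exact Nat.mod_mul_right_div_self idx _ pr.1
    simp only [List.map_cons, List.prod_cons, msDigits, List.zipWith_cons_cons]
    rw [h1, h3, h2]

theorem zip_map_same {α β γ : Type} (f : α → β) (g : α → γ) (l : List α) :
    (l.map f).zip (l.map g) = l.map (fun x => (f x, g x)) := by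
  induction l with
  | nil => rfl
  | cons x l ih => simp [ih]

-- ---- range(0, m, s) as cellOf ----

theorem cell_range (m s : Int) (hs : s ≠ 0) :
    PySem.List.pyRange 0 m s = cellOf ((pvCount m s).toNat, s) := by
  rcases lt_or_gt_of_ne hs with hneg | hpos
  · -- s < 0
    have ht : (0 : Int) < -s := by omega
    have hfd : PySem.Int.floordiv (m + s + 1) s = (-(m + s + 1)) / (-s) := by
      rw [← PySem.Int.floordiv_neg_neg (m + s + 1) s]
      exact PySem.Int.floordiv_eq_ediv_of_pos ht
    have hiff : ¬ (0 : Int) < s := by omega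
    simp only [PySem.List.pyRange, if_neg hs, if_neg hiff, pvCount, cellOf, hfd]
    have hnum : (0 : Int) - m + -s - 1 = -(m + s + 1) := by ring
    rw [hnum]
    by_cases hm : m < 0
    · have hq : (0 : Int) ≤ (-(m + s + 1)) / (-s) := Int.ediv_nonneg (by omega) (by omega)
      rw [if_pos hm]
      have hmax : max (0 : Int) ((-(m + s + 1)) / (-s)) = (-(m + s + 1)) / (-s) :=
        max_eq_right hq
      rw [hmax]
      apply List.map_congr_left
      intro k _
      ring
    · have hq : (-(m + s + 1)) / (-s) ≤ 0 :=
        ediv_nonpos_of_lt ht (by omega)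
      rw [if_neg hm]
      rw [max_eq_left hq]
      simp
  · -- s > 0
    have hfd : PySem.Int.floordiv (m + s - 1) s = (m + s - 1) / s :=
      PySem.Int.floordiv_eq_ediv_of_pos hpos
    simp only [PySem.List.pyRange, if_neg hs, if_pos hpos, pvCount, cellOf, hfd]
    have hnum : m - 0 + s - 1 = m + s - 1 := by ring
    rw [hnum]
    by_cases hm : (0 : Int) < m
    · have hq : (0 : Int) ≤ (m + s - 1) / s := Int.ediv_nonneg (by omega) (by omega)
      rw [if_pos hm]
      have hmax : max (0 : Int) ((m + s - 1) / s) = (m + s - 1) / s := max_eq_right hq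
      rw [hmax]
      apply List.map_congr_left
      intro k _
      ring
    · have hq : (m + s - 1) / s ≤ 0 := ediv_nonpos_of_lt hpos (by omega)
      rw [if_neg hm]
      rw [max_eq_left hq]
      simp

-- ---- chunking (A reshapes by rows, B by flat index) ----

def chunkBy {α : Type} : List (List (List α)) → List α → List (List α)
  | [], _ => []
  | r :: rs, combo => combo.take r.length :: chunkBy rs (combo.drop r.length)

theorem length_mem_pyProduct {α : Type} (ls : List (List α)) (u : List α)
    (hu : u ∈ pyProduct ls) : u.length = ls.length := by
  induction ls generalizing u with
  | nil => simp [pyProduct] at hu; simp [hu]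
  | cons l rest ih =>
    simp only [pyProduct, List.foldr_cons, List.mem_flatMap, List.mem_map] at hu
    obtain ⟨x, _, t, ht, rfl⟩ := hu
    simp [ih t ht]

theorem pyProduct_append {α : Type} (xs ys : List (List α)) :
    pyProduct (xs ++ ys) = (pyProduct xs).flatMap (fun u => (pyProduct ys).map (fun v => u ++ v)) := by
  induction xs with
  | nil => simp [pyProduct]
  | cons l rest ih =>
    simp only [List.cons_append, pyProduct, List.foldr_cons] at *
    rw [ih]
    simp only [List.flatMap_assoc, List.flatMap_map, List.map_flatMap, List.map_map, Function.comp_def, List.cons_append]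

theorem pyProduct_map_pyProduct {α : Type} (rows : List (List (List α))) :
    pyProduct (rows.map pyProduct)
      = (pyProduct rows.flatten).map (fun combo => chunkBy rows combo) := by
  induction rows with
  | nil => simp [pyProduct, chunkBy]
  | cons r rs ih =>
    simp only [List.map_cons, List.flatten_cons, pyProduct_append]
    show (pyProduct r).flatMap (fun u => (pyProduct (rs.map pyProduct)).map (fun t => u :: t)) = _
    rw [ih, List.map_flatMap]
    apply List.flatMap_congr
    intro u hu
    simp only [List.map_map, Function.comp_def, chunkBy,
      List.take_left' (length_mem_pyProduct r u hu),
      List.drop_left' (length_mem_pyProduct r u hu), List.map_map]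

theorem chunkBy_eq_slices {α : Type} (rows : List (List (List α))) (n : Nat)
    (hrow : ∀ r ∈ rows, r.length = n) (combo : List α) :
    chunkBy rows combo
      = (List.range rows.length).map (fun (i : Nat) =>
          PySem.List.slice combo (some ((i : Int) * (n : Int))) (some (((i : Int) + 1) * (n : Int)))) := by
  induction rows generalizing combo with
  | nil => simp [chunkBy]
  | cons r rs ih =>
    have hn : r.length = n := hrow r (by simp)
    simp only [chunkBy, hn, List.length_cons, List.range_succ_eq_map, List.map_cons, List.map_map]
    congr 1
    · simp
    · rw [ih (fun r hr => hrow r (by simp [hr]))]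
      apply List.map_congr_left
      intro i _
      simp only [Function.comp_def]
      have h1 : PySem.List.slice (combo.drop n) (some ((i : Int) * (n : Int))) (some (((i : Int) + 1) * (n : Int)))
          = ((combo.drop n).drop (i * n)).take ((i + 1) * n - i * n) := by
        have := PySem.List.slice_natCast (xs := combo.drop n) (a := i * n) (b := (i + 1) * n)
        push_cast at this ⊢
        convert this using 3
      have h2 : PySem.List.slice combo (some (((i : Nat) + 1 : Int) * (n : Int))) (some ((((i : Nat) + 1 : Int) + 1) * (n : Int)))
          = (combo.drop ((i + 1) * n)).take ((i + 2) * n - (i + 1) * n) := by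
        have := PySem.List.slice_natCast (xs := combo) (a := (i + 1) * n) (b := (i + 2) * n)
        push_cast at this ⊢
        convert this using 3
      simp only [Nat.succ_eq_add_one, Nat.cast_add, Nat.cast_one]
      rw [h1, h2, List.drop_drop]
      congr 1
      · simp only [Nat.add_mul, Nat.one_mul]; omega
      · congr 1; ring

-- ---- the main grid identity (shared shape of both ports) ----

theorem map_fst_pairs (n : Nat) (C : Nat → Nat → Nat) (S : Nat → Nat → Int) :
    (((List.range n).flatMap (fun i => (List.range n).map (fun j => (C i j, S i j)))).map
      (fun pr => pr.1))
    = (List.range n).flatMap (fun i => (List.range n).map (fun j => C i j)) := by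
  rw [List.map_flatMap]
  apply List.flatMap_congr
  intro i _
  rw [List.map_map]
  rfl

theorem grid_eq (n : Nat) (M : Nat → Int) (S : Nat → Nat → Int)
    (hs : ∀ i < n, ∀ j < n, S i j ≠ 0) :
    pyProduct (((List.range n).map (fun i => (List.range n).map (fun j =>
        PySem.List.pyRange 0 (M i) (S i j)))).map (fun row => pyProduct row))
    = (PySem.List.pyRange 0
        (((List.range n).flatMap (fun i => (List.range n).map (fun j =>
            pvCount (M i) (S i j)))).foldl (· * ·) 1) 1).map (fun idx =>
        (List.range n).map (fun (i : Nat) =>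
          PySem.List.slice
            (((((List.range n).flatMap (fun i => (List.range n).map (fun j =>
                  pvCount (M i) (S i j)))).zip
                ((List.range n).flatMap (fun i => (List.range n).map (fun j =>
                  S i j)))).reverse.foldl
              (fun (st : Int × List Int) cs =>
                (PySem.Int.floordiv st.1 cs.1, PySem.Int.mod st.1 cs.1 * cs.2 :: st.2))
              (idx, ([] : List Int))).2)
            (some ((i : Int) * (n : Int))) (some (((i : Int) + 1) * (n : Int))))) := by
  set pairs : List (Nat × Int) :=
    (List.range n).flatMap (fun i => (List.range n).map (fun j =>
      ((pvCount (M i) (S i j)).toNat, S i j))) with hpairs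
  set cnts : List Nat := pairs.map (fun pr => pr.1) with hcnts
  -- the Int count list of port B is the cast of cnts
  have hCI : (List.range n).flatMap (fun i => (List.range n).map (fun j =>
      pvCount (M i) (S i j))) = cnts.map (Nat.cast : Nat → Int) := by
    rw [hcnts, hpairs, map_fst_pairs, List.map_flatMap]
    apply List.flatMap_congr
    intro i _
    rw [List.map_map]
    apply List.map_congr_left
    intro j _
    simp only [Function.comp_def]
    rw [Int.toNat_of_nonneg]
    unfold pvCount
    split_ifs <;> exact le_max_left _ _
  -- the step list of port B is the second components of pairs
  have hST : (List.range n).flatMap (fun i => (List.range n).map (fun j =>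
      S i j)) = pairs.map (fun pr => pr.2) := by
    rw [hpairs, List.map_flatMap]
    apply List.flatMap_congr
    intro i _
    rw [List.map_map]
    rfl
  -- LHS: rows equal grid rows of cells
  have hrows : ((List.range n).map (fun i => (List.range n).map (fun j =>
      PySem.List.pyRange 0 (M i) (S i j)))) =
      (List.range n).map (fun i => (List.range n).map (fun j =>
        cellOf ((pvCount (M i) (S i j)).toNat, S i j))) := by
    apply List.map_congr_left
    intro i hi
    apply List.map_congr_left
    intro j hj
    rw [List.mem_range] at hi hj
    exact cell_range _ _ (hs i hi j hj)
  rw [hrows, pyProduct_map_pyProduct]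
  have hflat : ((List.range n).map (fun i => (List.range n).map (fun j =>
      cellOf ((pvCount (M i) (S i j)).toNat, S i j)))).flatten = pairs.map cellOf := by
    rw [hpairs, List.map_flatMap, ← List.flatMap_def]
    apply List.flatMap_congr
    intro i _
    rw [List.map_map]
    rfl
  rw [hflat, pyProduct_eq_decode 0]
  -- RHS range and zipped cells
  have htot : ((List.range n).flatMap (fun i => (List.range n).map (fun j =>
      pvCount (M i) (S i j)))).foldl (· * ·) 1 = ((cnts.prod : Nat) : Int) := by
    rw [hCI, ← List.prod_eq_foldl, ← Nat.cast_list_prod]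
  have hzip : (((List.range n).flatMap (fun i => (List.range n).map (fun j =>
      pvCount (M i) (S i j)))).zip
      ((List.range n).flatMap (fun i => (List.range n).map (fun j => S i j))))
      = pairs.map (fun pr => ((Nat.cast pr.1 : Int), pr.2)) := by
    rw [hCI, hST, hcnts, List.map_map]
    exact zip_map_same _ _ pairs
  rw [htot, hzip, PySem.List.pyRange_zero_natCast]
  simp only [List.map_map, Function.comp_def]
  have hN : prodLen (pairs.map cellOf) = cnts.prod := by
    rw [prodLen_map_cellOf, ← hcnts]
  rw [hN]
  apply List.map_congr_left
  intro k hk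
  rw [List.mem_range] at hk
  have hk' : k < (pairs.map (fun pr => pr.1)).prod := by rw [← hcnts]; exact hk
  -- the entry list of port B at idx = ↑k is the decoded combination
  rw [List.foldl_reverse, foldr_entries pairs k, Nat.mod_eq_of_lt hk',
    ← decode_eq_zip pairs k hk']
  -- A reshapes by rows, B by slices of the flat list: the same chunks
  have hrowlen : ∀ r ∈ (List.range n).map (fun i => (List.range n).map (fun j =>
      cellOf ((pvCount (M i) (S i j)).toNat, S i j))), r.length = n := by
    intro r hr
    rw [List.mem_map] at hr
    obtain ⟨i, _, rfl⟩ := hr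
    simp
  rw [chunkBy_eq_slices _ n hrowlen]
  simp only [List.length_map, List.length_range]

-- getD of a mapped power list at a valid index
theorem getD_mods (p : Int) (exps : List Int) (i : Nat) (hi : i < exps.length) :
    (mods_from_exponents p exps).getD i 0 = p ^ (exps.getD i 0).toNat := by
  simp [mods_from_exponents, List.getD_eq_getElem?_getD, List.getElem?_map,
    List.getElem?_eq_getElem hi]

-- ===== VERDICT (by name: the statement is the Claim_ definition above) =====
theorem endomorphism_matrices_spec : Claim_equal_endomorphism_matrices := by
  intro p exps _ hpre
  unfold Spec_endomorphism_matrices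
  obtain ⟨hnn, halt⟩ := hpre
  have hs : ∀ i < exps.length, ∀ j < exps.length,
      p ^ (max 0 (exps.getD i 0 - exps.getD j 0)).toNat ≠ 0 := by
    intro i hi j hj
    rcases halt with hp | hall
    · exact pow_ne_zero _ hp
    · have hieq : exps.getD i 0 = exps.getD j 0 := by
        rw [List.getD_eq_getElem?_getD, List.getD_eq_getElem?_getD,
          List.getElem?_eq_getElem hi, List.getElem?_eq_getElem hj]
        exact hall _ (List.getElem_mem hi) _ (List.getElem_mem hj)
      rw [hieq, sub_self]
      norm_num
  unfold endomorphism_matrices endomorphism_matrices_alt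
  simp only
  -- the totality guard of port A does not fire: all exponents are nonnegative
  have hg : exps.any (fun a => decide (a < 0)) = false := by
    rw [List.any_eq_false]
    intro a ha
    simpa using hnn a ha
  simp only [hg, Bool.false_eq_true, if_false]
  -- replace mods.getD by the power of the exponent
  have hrows : ((List.range exps.length).map (fun i => (List.range exps.length).map (fun j =>
      PySem.List.pyRange 0 ((mods_from_exponents p exps).getD i 0)
        (p ^ (max 0 (exps.getD i 0 - exps.getD j 0)).toNat)))) =
      ((List.range exps.length).map (fun i => (List.range exps.length).map (fun j =>
        PySem.List.pyRange 0 (p ^ (exps.getD i 0).toNat)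
          (p ^ (max 0 (exps.getD i 0 - exps.getD j 0)).toNat)))) := by
    apply List.map_congr_left
    intro i hi
    rw [List.mem_range] at hi
    rw [getD_mods p exps i hi]
  rw [hrows]
  exact grid_eq exps.length (fun i => p ^ (exps.getD i 0).toNat)
    (fun i j => p ^ (max 0 (exps.getD i 0 - exps.getD j 0)).toNat) hs
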